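-- pv_equiv track=rewrite | github.com/Gxrco/Compiler-DLP | chain_compiler/tools/regex_parser.py | expand_char_class
-- ===== SOURCE A (Python) =====
-- def expand_char_class(class_str):
--     """
--     Expande una clase de caracteres en una expresión regular.
--     Por ejemplo, [a-z] se convierte en (a|b|c|...|z)
--     """
--     content = class_str[1:-1]
--     is_negated = content.startswith('^')
--     if is_negated:
--         content = content[1:]
--
--     elements = []
--     i = 0
--     while i < len(content):
--         if i + 2 < len(content) and content[i+1] == '-':
--             start = content[i]
--             end = content[i+2]
--             for c in range(ord(start), ord(end)+1):
--                 elements.append(chr(c))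
--             i += 3
--         else:
--             elements.append(content[i])
--             i += 1
--
--     # Para clases negadas, necesitaríamos un enfoque diferente en regex
--     if is_negated:
--         return f"[^{''.join(elements)}]"
--     else:
--         # Para clases pequeñas, usar OR explícito
--         if len(elements) <= 5:
--             return "(" + "|".join(elements) + ")"
--         # Para clases grandes, mantener la sintaxis de clase de caracteres
--         else:
--             return class_str
-- ===== SOURCE B (Python) =====
-- def expand_char_class(class_str):
--     """One-pass fold with a lookbehind buffer instead of index lookahead."""
--     content = class_str[1:-1]
--     is_negated = content.startswith('^')
--     if is_negated:
--         content = content[1:]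
--
--     elements = []
--     pend = []  # 0-2 chars of a potential range prefix: [a] or [a, '-']
--     for ch in content:
--         if not pend:
--             pend = [ch]
--         elif len(pend) == 1:
--             if ch == '-':
--                 pend.append('-')
--             else:
--                 elements.append(pend[0])
--                 pend = [ch]
--         else:
--             elements.extend(chr(c) for c in range(ord(pend[0]), ord(ch) + 1))
--             pend = []
--     elements.extend(pend)
--
--     if is_negated:
--         return f"[^{''.join(elements)}]"
--     if len(elements) <= 5:
--         return "(" + "|".join(elements) + ")"
--     return class_str
-- ===== Notes on version B (the rewrite author's own statement) =====
-- stated objective: alternative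
-- what changed: Replaces A's index-based while-loop with two-character lookahead by a single left-to-right fold over the characters that carries a small lookbehind buffer (the pending range prefix) and flushes it at the end.
import Mathlib
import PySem

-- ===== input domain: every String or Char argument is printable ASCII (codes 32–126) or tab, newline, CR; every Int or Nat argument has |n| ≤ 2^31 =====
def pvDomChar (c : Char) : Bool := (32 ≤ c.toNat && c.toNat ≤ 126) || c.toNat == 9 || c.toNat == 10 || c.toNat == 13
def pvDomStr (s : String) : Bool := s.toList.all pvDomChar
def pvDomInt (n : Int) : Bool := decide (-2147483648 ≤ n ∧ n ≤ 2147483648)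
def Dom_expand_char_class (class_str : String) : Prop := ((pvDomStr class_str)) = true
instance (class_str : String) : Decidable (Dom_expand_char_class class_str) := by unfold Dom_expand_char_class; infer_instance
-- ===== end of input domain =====

-- B replaces A's index-lookahead while-loop by a single fold with a lookbehind buffer (objective: alternative, same cost).

-- ===== PORT A =====
-- A's while-loop over the index i, carrying the accumulated `elements`.
def aLoop (content : List Char) (i : Nat) (elements : List Char) : List Char :=
  if i < content.length then
    if i + 2 < content.length ∧ content.getD (i+1) ' ' = '-' then
      aLoop content (i+3)
        (elements ++
          (PySem.List.pyRange (content.getD i ' ').toNat ((content.getD (i+2) ' ').toNat + 1) 1).map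
            (fun n => Char.ofNat n.toNat))
    else
      aLoop content (i+1) (elements ++ [content.getD i ' '])
  else elements
termination_by content.length - i

def expand_char_class (class_str : String) : String :=
  let content := (PySem.Str.slice class_str (some 1) (some (-1))).toList
  let is_negated := PySem.Chars.startswith content ['^']
  let content := if is_negated then PySem.List.slice content (some 1) none else content
  let elements := aLoop content 0 []
  if is_negated then
    String.ofList (('[' :: '^' :: PySem.Chars.join [] (elements.map (fun c => [c]))) ++ [']'])
  else
    if elements.length ≤ 5 then
      String.ofList (('(' :: PySem.Chars.join ['|'] (elements.map (fun c => [c]))) ++ [')'])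
    else class_str

-- ===== PORT B =====
-- B's loop body: one step of the fold; `pend` is the lookbehind buffer ([], [a] or [a,'-']).
def bStep (st : List Char × List Char) (ch : Char) : List Char × List Char :=
  match st with
  | (elements, pend) =>
    match pend with
    | [] => (elements, [ch])
    | [a] => if ch = '-' then (elements, [a, '-']) else (elements ++ [a], [ch])
    | a :: _ =>
        (elements ++ (PySem.List.pyRange a.toNat (ch.toNat + 1) 1).map (fun n => Char.ofNat n.toNat), [])

def expand_char_class_alt (class_str : String) : String :=
  let content := (PySem.Str.slice class_str (some 1) (some (-1))).toList
  let is_negated := PySem.Chars.startswith content ['^']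
  let content := if is_negated then PySem.List.slice content (some 1) none else content
  let st := content.foldl bStep ([], [])
  let elements := st.1 ++ st.2
  if is_negated then
    String.ofList (('[' :: '^' :: PySem.Chars.join [] (elements.map (fun c => [c]))) ++ [']'])
  else
    if elements.length ≤ 5 then
      String.ofList (('(' :: PySem.Chars.join ['|'] (elements.map (fun c => [c]))) ++ [')'])
    else class_str

-- ===== PRECONDITION & SPEC =====
def Spec_expand_char_class (class_str : String) (out : String) : Prop := out = expand_char_class_alt class_str
instance (class_str : String) (out : String) : Decidable (Spec_expand_char_class class_str out) := by unfold Spec_expand_char_class; infer_instance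

-- ===== CLAIM (what is proved, stated in full; the proofs are below) =====
def Claim_equal_expand_char_class : Prop := ∀ (class_str : String), Dom_expand_char_class class_str → Spec_expand_char_class class_str (expand_char_class class_str)

-- ===== LEMMAS AND PROOFS =====

-- Proof-side tokenizer both loops are shown equal to.
def tok : List Char → List Char
  | a :: d :: b :: rest =>
      if d = '-' then
        (PySem.List.pyRange a.toNat (b.toNat + 1) 1).map (fun n => Char.ofNat n.toNat) ++ tok rest
      else a :: tok (d :: b :: rest)
  | [a, d] => [a, d]
  | [a] => [a]
  | [] => []
termination_by cs => cs.length

lemma tok_cons_ne (a c : Char) (cs : List Char) (h : c ≠ '-') :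
    tok (a :: c :: cs) = a :: tok (c :: cs) := by
  cases cs with
  | nil => simp [tok]
  | cons b r => rw [tok]; simp [h]

lemma aLoop_eq_tok (content : List Char) :
    ∀ (n i : Nat) (elements : List Char), content.length - i ≤ n →
      aLoop content i elements = elements ++ tok (content.drop i) := by
  intro n
  induction n with
  | zero =>
    intro i elements hn
    have hge : ¬ i < content.length := by omega
    rw [aLoop, if_neg hge, List.drop_eq_nil_of_le (by omega)]
    simp [tok]
  | succ n IH =>
    intro i elements hn
    rw [aLoop]
    by_cases hlt : i < content.length
    · by_cases hc : i + 2 < content.length ∧ content.getD (i+1) ' ' = '-'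
      · obtain ⟨h2, hd⟩ := hc
        have h1 : i + 1 < content.length := by omega
        rw [if_pos hlt, if_pos ⟨h2, hd⟩, IH (i+3) _ (by omega)]
        rw [List.drop_eq_getElem_cons hlt, List.drop_eq_getElem_cons h1,
          List.drop_eq_getElem_cons h2, tok]
        rw [List.getD_eq_getElem content ' ' h1] at hd
        simp [hd, List.getElem?_eq_getElem hlt, List.getElem?_eq_getElem h2,
          List.append_assoc, show i + 2 + 1 = i + 3 from rfl]
      · rw [if_pos hlt, if_neg hc, IH (i+1) _ (by omega),
          List.getD_eq_getElem content ' ' hlt, List.append_assoc, List.singleton_append,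
          List.drop_eq_getElem_cons hlt]
        congr 1
        by_cases h2 : i + 2 < content.length
        · have h1 : i + 1 < content.length := by omega
          have hd : content[i+1] ≠ '-' := by
            intro h; exact hc ⟨h2, by rw [List.getD_eq_getElem content ' ' h1, h]⟩
          rw [List.drop_eq_getElem_cons h1]
          exact (tok_cons_ne _ _ _ hd).symm
        · by_cases h1 : i + 1 < content.length
          · have he2 : content.drop (i+2) = [] := List.drop_eq_nil_of_le (by omega)
            rw [List.drop_eq_getElem_cons h1, he2]
            simp [tok]
          · have he1 : content.drop (i+1) = [] := List.drop_eq_nil_of_le (by omega)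
            rw [he1]
            simp [tok]
    · rw [if_neg hlt, List.drop_eq_nil_of_le (by omega)]
      simp [tok]

-- the buffer states B's fold can be in
def PendOK (pend : List Char) : Prop :=
  pend = [] ∨ (∃ a, pend = [a]) ∨ (∃ a, pend = [a, '-'])

lemma bFold_eq_tok (cs : List Char) : ∀ (elements pend : List Char), PendOK pend →
    (cs.foldl bStep (elements, pend)).1 ++ (cs.foldl bStep (elements, pend)).2
      = elements ++ tok (pend ++ cs) := by
  induction cs with
  | nil =>
    intro elements pend hok
    rcases hok with h | ⟨a, h⟩ | ⟨a, h⟩ <;> subst h <;> simp [tok]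
  | cons c cs IH =>
    intro elements pend hok
    rcases hok with h | ⟨a, h⟩ | ⟨a, h⟩ <;> subst h <;>
      simp only [List.foldl_cons, bStep]
    · simpa using IH elements [c] (Or.inr (Or.inl ⟨c, rfl⟩))
    · by_cases hc : c = '-'
      · subst hc
        simpa using IH elements [a, '-'] (Or.inr (Or.inr ⟨a, rfl⟩))
      · have h := IH (elements ++ [a]) [c] (Or.inr (Or.inl ⟨c, rfl⟩))
        simp only [if_neg hc]
        rw [h]
        simp [tok_cons_ne a c cs hc]
    · have h := IH (elements ++ (PySem.List.pyRange a.toNat (c.toNat + 1) 1).map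
        (fun n => Char.ofNat n.toNat)) [] (Or.inl rfl)
      rw [h]
      have ht : tok (a :: '-' :: c :: cs)
          = (PySem.List.pyRange a.toNat (c.toNat + 1) 1).map (fun n => Char.ofNat n.toNat)
            ++ tok cs := by rw [tok]; simp
      simp [ht, List.append_assoc]

-- ===== VERDICT (by name: the statement is the Claim_ definition above) =====
theorem expand_char_class_spec : Claim_equal_expand_char_class := by
  intro class_str _
  have key : ∀ (content : List Char),
      aLoop content 0 [] = (content.foldl bStep ([], [])).1 ++ (content.foldl bStep ([], [])).2 := by
    intro content
    rw [aLoop_eq_tok content content.length 0 [] (by omega),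
      bFold_eq_tok content [] [] (Or.inl rfl)]
    simp
  unfold Spec_expand_char_class expand_char_class expand_char_class_alt
  simp only [key]
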